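-- pv_equiv track=rewrite | github.com/threeML/threeML | threeML/plugins/ogip.py | slice_disjoint
-- ===== SOURCE A (Python) =====
-- def slice_disjoint(arr):
--     slices = []
--     startSlice = 0
--     counter = 0
--     for i in range(len(arr) - 1):
--         if arr[i + 1] > arr[i] + 1:
--             endSlice = arr[i]
--             slices.append([startSlice, endSlice])
--             startSlice = arr[i + 1]
--             counter += 1
--     if counter == 0:
--         return [[arr[0], arr[-1]]]
--     if endSlice != arr[-1]:
--         slices.append([startSlice, arr[-1]])
--     return slices
-- ===== SOURCE B (Python) =====
-- def slice_disjoint(arr):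
--     breaks = [i for i in range(len(arr) - 1) if arr[i + 1] > arr[i] + 1]
--     if not breaks:
--         return [[arr[0], arr[-1]]]
--     slices = [[0, arr[breaks[0]]]]
--     for prev, nxt in zip(breaks, breaks[1:]):
--         slices.append([arr[prev + 1], arr[nxt]])
--     if arr[breaks[-1]] != arr[-1]:
--         slices.append([arr[breaks[-1] + 1], arr[-1]])
--     return slices
-- ===== Notes on version B (the rewrite author's own statement) =====
-- stated objective: alternative
-- what changed: A builds the slices in one stateful scan (carrying startSlice/endSlice/counter); B first collects the list of break indices with a comprehension and then constructs the intervals from adjacent pairs of breaks in a separate pass.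
import Mathlib
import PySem

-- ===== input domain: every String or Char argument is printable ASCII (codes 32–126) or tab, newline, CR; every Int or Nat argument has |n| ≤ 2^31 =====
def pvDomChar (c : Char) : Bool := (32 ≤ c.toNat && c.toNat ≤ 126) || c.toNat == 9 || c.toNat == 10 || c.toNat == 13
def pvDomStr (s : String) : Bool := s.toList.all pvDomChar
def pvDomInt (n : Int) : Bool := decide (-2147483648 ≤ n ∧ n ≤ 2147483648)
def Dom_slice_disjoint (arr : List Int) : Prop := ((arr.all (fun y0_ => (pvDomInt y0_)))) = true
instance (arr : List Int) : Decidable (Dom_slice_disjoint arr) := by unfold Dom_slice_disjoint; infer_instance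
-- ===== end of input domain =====

-- B replaces A's single stateful scan by a break-index pass followed by a pairwise construction (objective: alternative decomposition, same cost).

-- ===== PORT A =====
-- loop body of A's for-loop; state = (slices, startSlice, counter, endSlice)
-- (endSlice is unbound in Python until the first break; it is only read when counter ≠ 0, so the 0 initial value is never observed)
def sdStep (arr : List Int) (s : List (List Int) × Int × Int × Int) (i : Int) :
    List (List Int) × Int × Int × Int :=
  if PySem.List.pyGetD arr (i + 1) 0 > PySem.List.pyGetD arr i 0 + 1 then
    (s.1 ++ [[s.2.1, PySem.List.pyGetD arr i 0]],
     PySem.List.pyGetD arr (i + 1) 0, s.2.2.1 + 1, PySem.List.pyGetD arr i 0)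
  else s

def slice_disjoint (arr : List Int) : List (List Int) :=
  let st := (PySem.List.pyRange 0 ((arr.length : Int) - 1) 1).foldl (sdStep arr) ([], 0, 0, 0)
  if st.2.2.1 = 0 then
    [[PySem.List.pyGetD arr 0 0, PySem.List.pyGetD arr (-1) 0]]
  else if st.2.2.2 ≠ PySem.List.pyGetD arr (-1) 0 then
    st.1 ++ [[st.2.1, PySem.List.pyGetD arr (-1) 0]]
  else st.1

-- ===== PORT B =====
def slice_disjoint_alt (arr : List Int) : List (List Int) :=
  let breaks := (PySem.List.pyRange 0 ((arr.length : Int) - 1) 1).filter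
    (fun i => PySem.List.pyGetD arr (i + 1) 0 > PySem.List.pyGetD arr i 0 + 1)
  match breaks with
  | [] => [[PySem.List.pyGetD arr 0 0, PySem.List.pyGetD arr (-1) 0]]
  | b0 :: rest =>
    let slices :=
      (List.zip (b0 :: rest) rest).foldl
        (fun acc pn =>
          acc ++ [[PySem.List.pyGetD arr (pn.1 + 1) 0, PySem.List.pyGetD arr pn.2 0]])
        [[0, PySem.List.pyGetD arr b0 0]]
    let lastb := (b0 :: rest).getLast (by simp)
    if PySem.List.pyGetD arr lastb 0 ≠ PySem.List.pyGetD arr (-1) 0 then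
      slices ++ [[PySem.List.pyGetD arr (lastb + 1) 0, PySem.List.pyGetD arr (-1) 0]]
    else slices

-- ===== PRECONDITION & SPEC =====
-- Pre_ excludes only the empty list, on which Python A raises IndexError (arr[0]).
def Pre_slice_disjoint (arr : List Int) : Prop := arr ≠ []
instance (arr : List Int) : Decidable (Pre_slice_disjoint arr) := by
  unfold Pre_slice_disjoint; infer_instance
def pvWitness_slice_disjoint : List Int := [1, 2, 5]

def Spec_slice_disjoint (arr : List Int) (out : List (List Int)) : Prop := out = slice_disjoint_alt arr
instance (arr : List Int) (out : List (List Int)) : Decidable (Spec_slice_disjoint arr out) := by unfold Spec_slice_disjoint; infer_instance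

-- ===== CLAIM (what is proved, stated in full; the proofs are below) =====
def Claim_equal_slice_disjoint : Prop := ∀ (arr : List Int), Dom_slice_disjoint arr → Pre_slice_disjoint arr → Spec_slice_disjoint arr (slice_disjoint arr)

-- ===== LEMMAS AND PROOFS =====

-- proof-side: the slices A has emitted, given pending start and the break indices seen so far
def emitFrom (arr : List Int) (start : Int) : List Int → List (List Int)
  | [] => []
  | b :: bs => [start, PySem.List.pyGetD arr b 0] :: emitFrom arr (PySem.List.pyGetD arr (b + 1) 0) bs

def startOf (arr : List Int) (start : Int) (bs : List Int) : Int :=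
  match bs.getLast? with
  | none => start
  | some b => PySem.List.pyGetD arr (b + 1) 0

def endOf (arr : List Int) (bs : List Int) : Int :=
  match bs.getLast? with
  | none => 0
  | some b => PySem.List.pyGetD arr b 0

theorem emitFrom_snoc (arr : List Int) (s : Int) (bs : List Int) (b : Int) :
    emitFrom arr s (bs ++ [b]) = emitFrom arr s bs ++ [[startOf arr s bs, PySem.List.pyGetD arr b 0]] := by
  induction bs generalizing s with
  | nil => simp [emitFrom, startOf]
  | cons x xs ih =>
      simp only [List.cons_append, emitFrom, ih, startOf]
      cases h : xs.getLast? with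
      | none =>
          cases xs with
          | nil => simp
          | cons y ys => simp at h
      | some c => simp [List.getLast?_cons, h]

theorem startOf_snoc (arr : List Int) (s : Int) (bs : List Int) (b : Int) :
    startOf arr s (bs ++ [b]) = PySem.List.pyGetD arr (b + 1) 0 := by
  simp [startOf]

theorem endOf_snoc (arr : List Int) (bs : List Int) (b : Int) :
    endOf arr (bs ++ [b]) = PySem.List.pyGetD arr b 0 := by
  simp [endOf]

-- invariant of A's fold over any index list L, in terms of the filtered break list
theorem foldA_char (arr : List Int) (L : List Int) :
    L.foldl (sdStep arr) ([], 0, 0, 0) =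
      (let bs := L.filter (fun i => decide (PySem.List.pyGetD arr (i + 1) 0 > PySem.List.pyGetD arr i 0 + 1))
       (emitFrom arr 0 bs, startOf arr 0 bs, (bs.length : Int), endOf arr bs)) := by
  induction L using List.reverseRecOn with
  | nil => simp [emitFrom, startOf, endOf]
  | append_singleton L i ih =>
      simp only [List.foldl_append, List.foldl_cons, List.foldl_nil, ih, List.filter_append,
        List.filter_cons, List.filter_nil]
      by_cases h : PySem.List.pyGetD arr (i + 1) 0 > PySem.List.pyGetD arr i 0 + 1
      · simp only [h, decide_true, sdStep]
        simp [emitFrom_snoc, startOf_snoc, endOf_snoc]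
      · simp [h, sdStep]

-- B's pairwise pass computes emitFrom
theorem zip_emit (arr : List Int) (b0 : Int) (rest : List Int) (acc : List (List Int)) :
    (List.zip (b0 :: rest) rest).foldl
        (fun acc pn =>
          acc ++ [[PySem.List.pyGetD arr (pn.1 + 1) 0, PySem.List.pyGetD arr pn.2 0]]) acc
      = acc ++ emitFrom arr (PySem.List.pyGetD arr (b0 + 1) 0) rest := by
  induction rest generalizing b0 acc with
  | nil => simp [emitFrom]
  | cons b1 bs ih =>
      have hz : List.zip (b0 :: b1 :: bs) (b1 :: bs) = (b0, b1) :: List.zip (b1 :: bs) bs := by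
        simp [List.zip]
      rw [hz, List.foldl_cons, ih]
      simp [emitFrom]

-- ===== VERDICT (by name: the statement is the Claim_ definition above) =====
theorem slice_disjoint_spec : Claim_equal_slice_disjoint := by
  intro arr _ _
  unfold Spec_slice_disjoint slice_disjoint slice_disjoint_alt
  rw [foldA_char]
  generalize (PySem.List.pyRange 0 ((arr.length : Int) - 1) 1).filter
      (fun i => decide (PySem.List.pyGetD arr (i + 1) 0 > PySem.List.pyGetD arr i 0 + 1)) = bs
  cases bs with
  | nil => simp
  | cons b0 rest =>
      have hlast : (b0 :: rest).getLast? = some ((b0 :: rest).getLast (by simp)) :=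
        List.getLast?_eq_some_getLast (by simp)
      have hstart : startOf arr 0 (b0 :: rest) =
          PySem.List.pyGetD arr ((b0 :: rest).getLast (by simp) + 1) 0 := by
        simp only [startOf, hlast]
      have hend : endOf arr (b0 :: rest) =
          PySem.List.pyGetD arr ((b0 :: rest).getLast (by simp)) 0 := by
        simp only [endOf, hlast]
      have hemit : emitFrom arr 0 (b0 :: rest) =
          [0, PySem.List.pyGetD arr b0 0] :: emitFrom arr (PySem.List.pyGetD arr (b0 + 1) 0) rest := by
        simp [emitFrom]
      simp only [hemit, hstart, hend, zip_emit]
      have hlen : ¬ ((((b0 :: rest).length : Int)) = 0) := by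
        simp only [List.length_cons]
        omega
      rw [if_neg hlen]
      by_cases h2 : PySem.List.pyGetD arr ((b0 :: rest).getLast (by simp)) 0 = PySem.List.pyGetD arr (-1) 0
      · rw [if_neg (by simp [h2]), if_neg (by simp [h2])]
        simp
      · rw [if_pos h2, if_pos h2]
        simp
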